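-- pv_equiv track=rewrite | github.com/benluks/quick-convert | quick_convert/pipelines/asv/prepare_dataset.py | _build_impostor_index
-- ===== SOURCE A (Python) =====
-- def _build_impostor_index(
--     test_by_spk: dict[str, list[dict[str, str]]],
-- ) -> dict[str, list[dict[str, str]]]:
--     all_speakers = sorted(test_by_spk.keys())
--     impostors_by_spk: dict[str, list[dict[str, str]]] = {}
--
--     for spk in all_speakers:
--         impostors: list[dict[str, str]] = []
--         for other_spk in all_speakers:
--             if other_spk == spk:
--                 continue
--             impostors.extend(test_by_spk[other_spk])
--         impostors_by_spk[spk] = impostors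
--
--     return impostors_by_spk
-- ===== SOURCE B (Python) =====
-- def _build_impostor_index(
--     test_by_spk: dict[str, list[dict[str, str]]],
-- ) -> dict[str, list[dict[str, str]]]:
--     speakers = sorted(test_by_spk.keys())
--     full: list[dict[str, str]] = []
--     for spk in speakers:
--         full.extend(test_by_spk[spk])
--     out: dict[str, list[dict[str, str]]] = {}
--     pos = 0
--     for spk in speakers:
--         end = pos + len(test_by_spk[spk])
--         out[spk] = full[:pos] + full[end:]
--         pos = end
--     return out
-- ===== Notes on version B (the rewrite author's own statement) =====
-- stated objective: alternative
-- what changed: The nested loop that re-scans all other speakers per speaker is replaced by one pass building a single flat concatenation of all entries in sorted-speaker order with a running offset, each impostor list then being a prefix-slice plus suffix-slice of that flat list.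
import Mathlib
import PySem

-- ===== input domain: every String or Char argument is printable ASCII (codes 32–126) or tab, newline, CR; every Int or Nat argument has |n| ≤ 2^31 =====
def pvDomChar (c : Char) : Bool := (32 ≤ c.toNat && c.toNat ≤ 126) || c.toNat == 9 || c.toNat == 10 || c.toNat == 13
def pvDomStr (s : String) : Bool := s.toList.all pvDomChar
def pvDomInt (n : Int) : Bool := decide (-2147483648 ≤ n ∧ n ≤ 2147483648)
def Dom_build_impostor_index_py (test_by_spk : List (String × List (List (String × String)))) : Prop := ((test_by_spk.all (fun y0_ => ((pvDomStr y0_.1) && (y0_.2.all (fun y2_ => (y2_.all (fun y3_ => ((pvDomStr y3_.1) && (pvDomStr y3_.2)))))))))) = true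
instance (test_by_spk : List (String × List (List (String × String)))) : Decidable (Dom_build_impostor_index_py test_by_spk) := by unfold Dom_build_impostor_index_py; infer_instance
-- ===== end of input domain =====

-- B replaces A's nested loop over all other speakers with one flat concatenation in
-- sorted-speaker order and a running offset; each impostor list is the prefix ++ suffix
-- slices of that single flat list (alternative decomposition, same overall cost).


-- ===== PORT A =====
def build_impostor_index_py (test_by_spk : List (String × List (List (String × String)))) : List (String × List (List (String × String))) :=
  let d := PySem.Dict.ofList test_by_spk
  let all_speakers := PySem.List.sorted d.keys (fun k => k) false
  let impostors_by_spk := all_speakers.foldl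
    (fun (acc : PySem.Dict String (List (List (String × String)))) spk =>
      acc.insert spk (all_speakers.foldl
        (fun imps other_spk =>
          if other_spk == spk then imps else imps ++ d.getD other_spk [])
        []))
    PySem.Dict.empty
  impostors_by_spk.items

-- ===== PORT B =====
def build_impostor_index_py_alt (test_by_spk : List (String × List (List (String × String)))) : List (String × List (List (String × String))) :=
  let d := PySem.Dict.ofList test_by_spk
  let speakers := PySem.List.sorted d.keys (fun k => k) false
  let full := speakers.foldl (fun full spk => full ++ d.getD spk []) []
  let st := speakers.foldl
    (fun (p : PySem.Dict String (List (List (String × String))) × Int) spk =>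
      (p.1.insert spk (PySem.List.slice full none (some p.2) ++
                       PySem.List.slice full (some (p.2 + ((d.getD spk []).length : Int))) none),
       p.2 + ((d.getD spk []).length : Int)))
    (PySem.Dict.empty, 0)
  st.1.items

-- ===== PRECONDITION & SPEC =====
def Spec_build_impostor_index_py (test_by_spk : List (String × List (List (String × String)))) (out : List (String × List (List (String × String)))) : Prop := out = build_impostor_index_py_alt test_by_spk
instance (test_by_spk : List (String × List (List (String × String)))) (out : List (String × List (List (String × String)))) : Decidable (Spec_build_impostor_index_py test_by_spk out) := by unfold Spec_build_impostor_index_py; infer_instance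

-- ===== CLAIM (what is proved, stated in full; the proofs are below) =====
def Claim_equal_build_impostor_index_py : Prop := ∀ (test_by_spk : List (String × List (List (String × String)))), Dom_build_impostor_index_py test_by_spk → Spec_build_impostor_index_py test_by_spk (build_impostor_index_py test_by_spk)

-- ===== LEMMAS AND PROOFS =====

-- A's inner loop over all speakers computes the flatMap of g over the speakers other than spk.
theorem innerA_eq {E : Type} (sp : List String) (spk : String) (g : String → List E) :
    sp.foldl (fun imps other_spk => if other_spk == spk then imps else imps ++ g other_spk) [] =
      (sp.filter (fun o => o != spk)).flatMap g := by
  have h : sp.foldl (fun imps other_spk => if other_spk == spk then imps else imps ++ g other_spk) [] =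
      sp.foldl (fun imps other_spk => if (other_spk != spk) = true then imps ++ g other_spk else imps) [] := by
    apply PySem.List.foldl_congr_mem
    intro acc x _
    by_cases hx : x = spk <;> simp [hx]
  rw [h, PySem.List.foldl_if_eq_foldl_filter, PySem.List.foldl_append_eq_flatMap]
  simp

-- the per-speaker (prefix, suffix)-slice outputs of B's second loop, as a recursive spec
def bspec {E : Type} (full : List E) (g : String → List E) : List String → Int → List (String × List E)
  | [], _ => []
  | k :: r, pos =>
      (k, PySem.List.slice full none (some pos) ++
          PySem.List.slice full (some (pos + ((g k).length : Int))) none) ::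
        bspec full g r (pos + ((g k).length : Int))

-- B's second loop appends exactly bspec to the accumulated dict's items (fresh keys at each step).
theorem Bloop_items {E : Type} (full : List E) (g : String → List E) :
    ∀ (suf : List String) (d0 : PySem.Dict String (List E)) (pos : Int),
      suf.Nodup → (∀ k ∈ suf, d0.contains k = false) →
      ((suf.foldl
          (fun (p : PySem.Dict String (List E) × Int) spk =>
            (p.1.insert spk (PySem.List.slice full none (some p.2) ++
                             PySem.List.slice full (some (p.2 + ((g spk).length : Int))) none),
             p.2 + ((g spk).length : Int)))
          (d0, pos)).1).items = d0.items ++ bspec full g suf pos := by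
  intro suf
  induction suf with
  | nil => intro d0 pos _ _; simp [bspec]
  | cons k r ih =>
      intro d0 pos hnd hfresh
      simp only [List.foldl_cons, bspec]
      rw [ih _ _ (by exact hnd.of_cons)
        (by
          intro k' hk'
          rw [PySem.Dict.contains_insert]
          have hne : k' ≠ k := by
            intro he; exact (List.nodup_cons.mp hnd).1 (he ▸ hk')
          simp [hne, hfresh k' (List.mem_cons_of_mem _ hk')])]
      rw [PySem.Dict.items_insert_of_not_contains _ _ (hfresh k (List.mem_cons_self))]
      simp

-- bspec over a suffix, with the offset at the end of the prefix, is the filter-based map.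
theorem bspec_eq {E : Type} (g : String → List E) :
    ∀ (suf pre : List String), (pre ++ suf).Nodup →
      bspec ((pre ++ suf).flatMap g) g suf ((pre.flatMap g).length : Int) =
        suf.map (fun k => (k, ((pre ++ suf).filter (fun o => o != k)).flatMap g)) := by
  intro suf
  induction suf with
  | nil => intro pre _; simp [bspec]
  | cons k r ih =>
      intro pre hnd
      have hknr : k ∉ r := by
        have := (List.nodup_append.mp hnd).2.1
        exact (List.nodup_cons.mp this).1
      have hknp : k ∉ pre := by
        intro hk
        exact (List.disjoint_of_nodup_append hnd) hk List.mem_cons_self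
      simp only [bspec, List.map_cons]
      refine List.cons_eq_cons.mpr ⟨?_, ?_⟩
      · -- head entry
        have hfull : (pre ++ k :: r).flatMap g = pre.flatMap g ++ (g k ++ r.flatMap g) := by
          simp
        rw [hfull, PySem.List.slice_to_natCast, List.take_left]
        have hcast : ((pre.flatMap g).length : Int) + ((g k).length : Int) =
            (((pre.flatMap g ++ g k).length : Nat) : Int) := by
          simp
        rw [hcast, PySem.List.slice_from_natCast]
        have hdrop : (pre.flatMap g ++ (g k ++ r.flatMap g)).drop (pre.flatMap g ++ g k).length
            = r.flatMap g := by
          rw [← List.append_assoc, List.drop_left]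
        rw [hdrop]
        have hfilter : (pre ++ k :: r).filter (fun o => o != k) = pre ++ r := by
          rw [List.filter_append, List.filter_cons]
          simp only [bne_self_eq_false, Bool.false_eq_true, ite_false]
          rw [List.filter_eq_self.mpr (by intro x hx; simp [ne_eq]; intro he; exact hknp (he ▸ hx)),
              List.filter_eq_self.mpr (by intro x hx; simp [ne_eq]; intro he; exact hknr (he ▸ hx))]
        rw [hfilter]
        simp
      · -- tail entries, via ih with pre' := pre ++ [k]
        have hprm : (pre ++ k :: r) = ((pre ++ [k]) ++ r) := by simp
        have hnd' : ((pre ++ [k]) ++ r).Nodup := by rw [← hprm]; exact hnd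
        have := ih (pre ++ [k]) hnd'
        have hlen : (((pre ++ [k]).flatMap g).length : Int) =
            ((pre.flatMap g).length : Int) + ((g k).length : Int) := by
          simp
        rw [hlen] at this
        rw [hprm, this]

-- A's outer loop inserts fresh distinct keys, so its items are the map over speakers.
theorem outerA_items {E : Type} (sp : List String) (v : String → List E) (hnd : sp.Nodup) :
    (sp.foldl (fun (acc : PySem.Dict String (List E)) spk => acc.insert spk (v spk))
        PySem.Dict.empty).items = sp.map (fun spk => (spk, v spk)) := by
  have h := PySem.Dict.items_foldl_insert_fresh (l := sp) (k := fun s : String => s) (v := v)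
    (d := PySem.Dict.empty)
    (by intro a _; exact PySem.Dict.contains_empty a) (by simpa using hnd)
  simpa using h

-- ===== VERDICT (by name: the statement is the Claim_ definition above) =====
theorem build_impostor_index_py_spec : Claim_equal_build_impostor_index_py := by
  intro t _
  unfold Spec_build_impostor_index_py build_impostor_index_py build_impostor_index_py_alt
  simp only []
  set d := PySem.Dict.ofList t with hd
  set sp := PySem.List.sorted d.keys (fun k => k) false with hsp
  have hnd : sp.Nodup := ((PySem.List.sorted_perm d.keys (fun k => k) false).nodup_iff).mpr
    (PySem.Dict.nodup_keys_ofList t)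
  set g : String → List (List (String × String)) := fun s => d.getD s [] with hg
  -- A side
  rw [outerA_items sp _ hnd]
  -- B side
  have hfull : sp.foldl (fun full spk => full ++ d.getD spk []) [] = sp.flatMap g := by
    rw [PySem.List.foldl_append_eq_flatMap]; simp [hg]
  rw [hfull]
  rw [Bloop_items (sp.flatMap g) g sp PySem.Dict.empty 0 hnd
    (by intro k _; exact PySem.Dict.contains_empty k)]
  have h0 : (0 : Int) = ((([] : List String).flatMap g).length : Int) := by simp
  rw [h0]
  have := bspec_eq g sp [] (by simpa using hnd)
  simp only [List.nil_append] at this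
  rw [this]
  apply List.map_congr_left
  intro k _
  rw [innerA_eq sp k g]
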